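-- pv_equiv track=rewrite | github.com/gbud/Fundamentals-of-CS-and-Programming | week11_midterm2/practice_midterm2.py | getTimeSpent
-- ===== SOURCE A (Python) =====
-- def getTimeSpent(logs):
--     times = dict()
--     for (time, person) in logs:
--         if person in times:
--             times[person].append(time)
--         else:
--             times[person] = [time]
--     result = dict()
--     for person in times:
--         log = times[person]
--         personsTime = 0
--         for i in range(len(log)):
--             if i % 2 == 0:
--                 personsTime -= log[i]
--             else:
--                 personsTime += log[i]
--         result[person] = personsTime
--     return result
-- ===== SOURCE B (Python) =====
-- def getTimeSpent(logs):
--     result = {}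
--     count = {}
--     for (time, person) in logs:
--         if person not in result:
--             result[person] = 0
--             count[person] = 0
--         if count[person] % 2 == 0:
--             result[person] -= time
--         else:
--             result[person] += time
--         count[person] += 1
--     return result
-- ===== Notes on version B (the rewrite author's own statement) =====
-- stated objective: simpler
-- what changed: One single pass over the logs maintaining a running alternating sum and a parity counter per person, instead of first grouping times into per-person lists and then a second nested pass summing each list.
import Mathlib
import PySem

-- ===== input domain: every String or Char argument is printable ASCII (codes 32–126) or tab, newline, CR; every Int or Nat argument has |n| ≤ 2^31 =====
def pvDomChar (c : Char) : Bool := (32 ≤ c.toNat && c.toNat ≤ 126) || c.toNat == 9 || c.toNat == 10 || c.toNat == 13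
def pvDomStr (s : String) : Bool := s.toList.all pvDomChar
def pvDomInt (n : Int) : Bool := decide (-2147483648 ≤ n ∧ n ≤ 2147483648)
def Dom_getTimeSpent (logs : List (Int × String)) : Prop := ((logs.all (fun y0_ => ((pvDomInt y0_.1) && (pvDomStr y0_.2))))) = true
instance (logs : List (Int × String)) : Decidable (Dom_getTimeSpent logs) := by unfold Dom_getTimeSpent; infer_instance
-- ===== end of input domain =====

-- B replaces A's two phases (group the times into per-person lists, then a second nested pass
-- computing each alternating sum) by ONE pass keeping a running signed sum and a parity counter
-- per person; objective: simpler (same asymptotic cost).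

-- ===== PORT A =====
-- A's inner loop: 'for i in range(len(log)): if i % 2 == 0: personsTime -= log[i] else: personsTime += log[i]'
-- (the index i is always in range, so the default of pyGetD is never used)
def pvAltLoop (log : List Int) : Int :=
  (PySem.List.pyRange 0 (log.length : Int)).foldl
    (fun personsTime i =>
      if PySem.Int.mod i 2 == 0 then personsTime - PySem.List.pyGetD log i 0
      else personsTime + PySem.List.pyGetD log i 0) 0

def getTimeSpent (logs : List (Int × String)) : List (String × Int) :=
  let times : PySem.Dict String (List Int) :=
    logs.foldl (fun times tp =>
      if times.contains tp.2 then times.modify tp.2 [] (fun l => l ++ [tp.1])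
      else times.insert tp.2 [tp.1]) PySem.Dict.empty
  let result : PySem.Dict String Int :=
    times.items.foldl (fun result pr => result.insert pr.1 (pvAltLoop pr.2)) PySem.Dict.empty
  result.items

-- ===== PORT B =====
-- one iteration of B's single loop; state = (result, count)
def pvBStep (st : PySem.Dict String Int × PySem.Dict String Int) (tp : Int × String) :
    PySem.Dict String Int × PySem.Dict String Int :=
  let st2 := if st.1.contains tp.2 then st else (st.1.insert tp.2 0, st.2.insert tp.2 0)
  let result :=
    if PySem.Int.mod (st2.2.getD tp.2 0) 2 == 0 then st2.1.modify tp.2 0 (fun v => v - tp.1)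
    else st2.1.modify tp.2 0 (fun v => v + tp.1)
  (result, st2.2.modify tp.2 0 (fun v => v + 1))

def getTimeSpent_alt (logs : List (Int × String)) : List (String × Int) :=
  (logs.foldl pvBStep (PySem.Dict.empty, PySem.Dict.empty)).1.items

-- ===== PRECONDITION & SPEC =====
def Spec_getTimeSpent (logs : List (Int × String)) (out : List (String × Int)) : Prop := out = getTimeSpent_alt logs
instance (logs : List (Int × String)) (out : List (String × Int)) : Decidable (Spec_getTimeSpent logs out) := by unfold Spec_getTimeSpent; infer_instance

-- ===== CLAIM (what is proved, stated in full; the proofs are below) =====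
def Claim_equal_getTimeSpent : Prop := ∀ (logs : List (Int × String)), Dom_getTimeSpent logs → Spec_getTimeSpent logs (getTimeSpent logs)

-- ===== LEMMAS AND PROOFS =====

-- the distinct persons of the log, in first-occurrence order
def pvPersons (logs : List (Int × String)) : List String := PySem.Set.ofList (logs.map (·.2))

-- the times recorded for person p, in log order
def pvTimes (p : String) (logs : List (Int × String)) : List Int :=
  (logs.filter (fun q => q.2 == p)).map (·.1)

-- alternating sum of l, the element at offset j getting sign (-1)^(k+j)
def pvSgnSum (l : List Int) (k : Nat) : Int :=
  match l with
  | [] => 0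
  | a :: l => (if k % 2 = 0 then -a else a) + pvSgnSum l (k + 1)

-- the common characterisation both ports are reduced to
def pvSpec (logs : List (Int × String)) : List (String × Int) :=
  (pvPersons logs).map (fun p => (p, pvSgnSum (pvTimes p logs) 0))

theorem pvSgnSum_append (l : List Int) (t : Int) (k : Nat) :
    pvSgnSum (l ++ [t]) k = pvSgnSum l k + (if (k + l.length) % 2 = 0 then -t else t) := by
  induction l generalizing k with
  | nil => simp [pvSgnSum]
  | cons a l ih =>
    simp only [List.cons_append, pvSgnSum, ih (k + 1), List.length_cons]
    have : k + 1 + l.length = k + (l.length + 1) := by omega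
    rw [this]; ring_nf

theorem pvAltLoop_concat (l : List Int) (t : Int) :
    pvAltLoop (l ++ [t]) = pvAltLoop l + (if l.length % 2 = 0 then -t else t) := by
  unfold pvAltLoop
  have hlen : ((l ++ [t]).length : Int) = (l.length : Int) + 1 := by
    simp
  rw [hlen, PySem.List.pyRange_one_succ_right (Int.natCast_nonneg _), List.foldl_append]
  have hpre : ∀ (acc : Int), ∀ i ∈ PySem.List.pyRange 0 (l.length : Int),
      (if PySem.Int.mod i 2 == 0 then acc - PySem.List.pyGetD (l ++ [t]) i 0
       else acc + PySem.List.pyGetD (l ++ [t]) i 0)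
      = (if PySem.Int.mod i 2 == 0 then acc - PySem.List.pyGetD l i 0
       else acc + PySem.List.pyGetD l i 0) := by
    intro acc i hi
    rw [PySem.List.mem_pyRange_one] at hi
    obtain ⟨h0, hlt⟩ := hi
    obtain ⟨n, rfl⟩ : ∃ n : Nat, i = (n : Int) := ⟨i.toNat, (Int.toNat_of_nonneg h0).symm⟩
    have hn : n < l.length := by exact_mod_cast hlt
    rw [PySem.List.pyGetD_natCast, PySem.List.pyGetD_natCast, List.getD_append _ _ _ _ hn]
  rw [PySem.List.foldl_congr_mem _ _ _ _ hpre]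
  simp only [List.foldl_cons, List.foldl_nil, PySem.List.pyGetD_natCast]
  have hget : (l ++ [t]).getD l.length 0 = t := by
    simp [List.getD_eq_getElem?_getD]
  rw [hget]
  rw [show PySem.Int.mod (l.length : Int) 2 = ((l.length % 2 : Nat) : Int) from PySem.Int.mod_natCast l.length 2]
  by_cases hp : l.length % 2 = 0
  · have hc : (((l.length % 2 : Nat) : Int) == 0) = true := by rw [hp]; rfl
    rw [hc, if_pos hp]
    simp only [if_true]
    ring
  · have h1 : l.length % 2 = 1 := by omega
    have hc : (((l.length % 2 : Nat) : Int) == 0) = false := by rw [h1]; rfl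
    rw [hc, if_neg hp]
    rfl

theorem pvAltLoop_eq (l : List Int) : pvAltLoop l = pvSgnSum l 0 := by
  induction l using List.reverseRecOn with
  | nil => rfl
  | append_singleton l t ih =>
    rw [pvAltLoop_concat, pvSgnSum_append, ih]
    simp

theorem pvPersons_append (logs : List (Int × String)) (x : Int × String) :
    pvPersons (logs ++ [x]) = PySem.Set.add (pvPersons logs) x.2 := by
  simp [pvPersons, PySem.Set.ofList_eq_foldl, List.foldl_append]

theorem pvTimes_append (p : String) (logs : List (Int × String)) (x : Int × String) :
    pvTimes p (logs ++ [x]) = pvTimes p logs ++ (if x.2 == p then [x.1] else []) := by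
  simp only [pvTimes, List.filter_append, List.map_append]
  by_cases h : x.2 == p <;> simp [h]

theorem pvMem_persons (p : String) (logs : List (Int × String)) :
    p ∈ pvPersons logs ↔ p ∈ logs.map (·.2) := by
  simp [pvPersons, PySem.Set.mem_ofList]

theorem pvTimes_nil_of_not_mem (p : String) (logs : List (Int × String))
    (h : p ∉ pvPersons logs) : pvTimes p logs = [] := by
  rw [pvMem_persons] at h
  simp only [pvTimes, List.map_eq_nil_iff, List.filter_eq_nil_iff]
  intro q hq hbeq
  exact h (List.mem_map.mpr ⟨q, hq, eq_of_beq hbeq⟩)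

-- ===== A = pvSpec =====
theorem getTimeSpent_eq_spec (logs : List (Int × String)) : getTimeSpent logs = pvSpec logs := by
  have hstep : ∀ (acc : PySem.Dict String (List Int)), ∀ tp ∈ logs,
      (if acc.contains tp.2 then acc.modify tp.2 [] (fun l => l ++ [tp.1]) else acc.insert tp.2 [tp.1])
      = acc.modify tp.2 [] (fun l => l ++ [tp.1]) := by
    intro d tp _
    by_cases h : d.contains tp.2 = true
    · rw [if_pos h]
    · have h' : d.contains tp.2 = false := by revert h; cases d.contains tp.2 <;> simp
      rw [if_neg (by simp [h']),
        show d.modify tp.2 [] (fun l => l ++ [tp.1]) = d.insert tp.2 ((d.getD tp.2 []) ++ [tp.1]) from rfl,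
        PySem.Dict.getD_of_not_contains d [] h']
      rfl
  unfold getTimeSpent
  rw [PySem.List.foldl_congr_mem _ _ _ _ hstep]
  set Ts := logs.foldl (fun d tp => d.modify tp.2 [] (fun l => l ++ [tp.1])) PySem.Dict.empty with hTs
  have hkeys : Ts.keys = pvPersons logs := by
    rw [hTs, PySem.Dict.keys_foldl_modify_key logs (fun tp => tp.2) [] (fun _ tp l => l ++ [tp.1]) PySem.Dict.empty]
    simp [PySem.Set.update, PySem.Set.ofList_eq_foldl, PySem.Dict.keys_empty, pvPersons]
  have hnodup : Ts.keys.Nodup := by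
    rw [hTs]
    exact PySem.Dict.nodup_keys_foldl_modify_key logs (fun tp => tp.2) [] (fun _ tp l => l ++ [tp.1]) PySem.Dict.empty PySem.Dict.nodup_keys_empty
  have hgetD : ∀ p, Ts.getD p [] = pvTimes p logs := by
    intro p
    have hmap : Ts = (logs.map Prod.swap).foldl (fun d pr => d.modify pr.1 [] (fun l => l ++ [pr.2])) PySem.Dict.empty := by
      rw [List.foldl_map]
      simp only [Prod.fst_swap, Prod.snd_swap]
      exact hTs
    rw [hmap, PySem.Dict.getD_foldl_modify_append]
    simp [pvTimes, List.filter_map, Function.comp_def, Prod.swap]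
  have hitems : Ts.items = (pvPersons logs).map (fun p => (p, pvTimes p logs)) := by
    rw [PySem.Dict.items_eq_map_keys Ts hnodup [], hkeys]
    exact List.map_congr_left (fun p hp => by rw [hgetD])
  rw [PySem.Dict.items_foldl_insert_fresh Ts.items (fun pr => pr.1) (fun pr => pvAltLoop pr.2) PySem.Dict.empty
      (fun a _ => by simp [PySem.Dict.contains_empty]) hnodup,
    show (PySem.Dict.empty : PySem.Dict String Int).items = [] from rfl]
  rw [hitems]
  simp only [List.nil_append, List.map_map, Function.comp_def]
  unfold pvSpec
  exact List.map_congr_left (fun p _ => by rw [pvAltLoop_eq])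

-- ===== B = pvSpec =====
theorem pvB_inv (logs : List (Int × String)) :
    (logs.foldl pvBStep (PySem.Dict.empty, PySem.Dict.empty)).1.items
      = (pvPersons logs).map (fun p => (p, pvSgnSum (pvTimes p logs) 0)) ∧
    (logs.foldl pvBStep (PySem.Dict.empty, PySem.Dict.empty)).2.items
      = (pvPersons logs).map (fun p => (p, ((pvTimes p logs).length : Int))) := by
  induction logs using List.reverseRecOn with
  | nil => exact ⟨rfl, rfl⟩
  | append_singleton logs x ih =>
    obtain ⟨ih1, ih2⟩ := ih
    rw [List.foldl_append]
    set S := logs.foldl pvBStep (PySem.Dict.empty, PySem.Dict.empty) with hS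
    simp only [List.foldl_cons, List.foldl_nil]
    have hk1 : S.1.keys = pvPersons logs := by
      show S.1.items.map (·.1) = _
      rw [ih1, List.map_map]
      simp [Function.comp_def]
    have hk2 : S.2.keys = pvPersons logs := by
      show S.2.items.map (·.1) = _
      rw [ih2, List.map_map]
      simp [Function.comp_def]
    have hnd : (pvPersons logs).Nodup := PySem.Set.nodup_ofList _
    have hmodcast : ∀ n : Nat, PySem.Int.mod (n : Int) 2 = ((n % 2 : Nat) : Int) := fun n => by
      exact_mod_cast PySem.Int.mod_natCast n 2
    have hother : ∀ p, p ≠ x.2 → pvTimes p (logs ++ [x]) = pvTimes p logs := by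
      intro p hpq
      have hne : (x.2 == p) = false := beq_eq_false_iff_ne.mpr (fun h => hpq h.symm)
      rw [pvTimes_append, hne]
      simp
    by_cases hx : x.2 ∈ pvPersons logs
    · -- person already seen
      have hc1 : S.1.contains x.2 = true := (PySem.Dict.contains_iff_mem_keys _ _).mpr (hk1 ▸ hx)
      have hcnt : S.2.getD x.2 0 = ((pvTimes x.2 logs).length : Int) := by
        apply PySem.Dict.getD_of_mem_items
        · rw [ih2]; exact List.mem_map.mpr ⟨x.2, hx, rfl⟩
        · rw [hk2]; exact hnd
      have hres : S.1.getD x.2 0 = pvSgnSum (pvTimes x.2 logs) 0 := by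
        apply PySem.Dict.getD_of_mem_items
        · rw [ih1]; exact List.mem_map.mpr ⟨x.2, hx, rfl⟩
        · rw [hk1]; exact hnd
      have hpersons : pvPersons (logs ++ [x]) = pvPersons logs := by
        rw [pvPersons_append, PySem.Set.add, if_pos ((PySem.Set.contains_iff _ _).mpr hx)]
      unfold pvBStep
      simp only [hc1, if_true, hcnt]
      constructor
      · -- result component
        by_cases hp : (pvTimes x.2 logs).length % 2 = 0
        · have hb : (PySem.Int.mod ((pvTimes x.2 logs).length : Int) 2 == 0) = true := by
            rw [hmodcast, hp]; rfl
          rw [hb, if_pos rfl]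
          rw [show S.1.modify x.2 0 (fun v => v - x.1) = S.1.insert x.2 (S.1.getD x.2 0 - x.1) from rfl,
            PySem.Dict.items_insert_of_contains _ _ hc1, ih1, List.map_map, hpersons]
          apply List.map_congr_left
          intro p hp'
          by_cases hpq : p = x.2
          · subst hpq
            simp only [Function.comp_def, beq_self_eq_true, if_true]
            rw [hres, pvTimes_append, if_pos (by simp), pvSgnSum_append]
            simp [hp, sub_eq_add_neg]
          · have : (p == x.2) = false := beq_eq_false_iff_ne.mpr hpq
            simp only [Function.comp_def, this, Bool.false_eq_true, if_false]
            rw [hother p hpq]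
        · have hb : (PySem.Int.mod ((pvTimes x.2 logs).length : Int) 2 == 0) = false := by
            have h1 : (pvTimes x.2 logs).length % 2 = 1 := by omega
            rw [hmodcast, h1]; rfl
          rw [hb, if_neg (by simp)]
          rw [show S.1.modify x.2 0 (fun v => v + x.1) = S.1.insert x.2 (S.1.getD x.2 0 + x.1) from rfl,
            PySem.Dict.items_insert_of_contains _ _ hc1, ih1, List.map_map, hpersons]
          apply List.map_congr_left
          intro p hp'
          by_cases hpq : p = x.2
          · subst hpq
            simp only [Function.comp_def, beq_self_eq_true, if_true]
            rw [hres, pvTimes_append, if_pos (by simp), pvSgnSum_append]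
            simp [hp]
          · have : (p == x.2) = false := beq_eq_false_iff_ne.mpr hpq
            simp only [Function.comp_def, this, Bool.false_eq_true, if_false]
            rw [hother p hpq]
      · -- count component
        have hc2 : S.2.contains x.2 = true := (PySem.Dict.contains_iff_mem_keys _ _).mpr (hk2 ▸ hx)
        rw [show S.2.modify x.2 0 (fun v => v + 1) = S.2.insert x.2 (S.2.getD x.2 0 + 1) from rfl,
          PySem.Dict.items_insert_of_contains _ _ hc2, ih2, List.map_map, hpersons]
        apply List.map_congr_left
        intro p hp'
        by_cases hpq : p = x.2
        · subst hpq
          simp only [Function.comp_def, beq_self_eq_true, if_true]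
          rw [hcnt, pvTimes_append, if_pos (by simp)]
          simp
        · have : (p == x.2) = false := beq_eq_false_iff_ne.mpr hpq
          simp only [Function.comp_def, this, Bool.false_eq_true, if_false]
          rw [hother p hpq]
    · -- new person
      have hc1 : S.1.contains x.2 = false := by
        have := (PySem.Dict.contains_iff_mem_keys S.1 x.2)
        rw [hk1] at this
        cases h : S.1.contains x.2
        · rfl
        · exact absurd (this.mp h) hx
      have hc2 : S.2.contains x.2 = false := by
        have := (PySem.Dict.contains_iff_mem_keys S.2 x.2)
        rw [hk2] at this
        cases h : S.2.contains x.2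
        · rfl
        · exact absurd (this.mp h) hx
      have hT0 : pvTimes x.2 logs = [] := pvTimes_nil_of_not_mem _ _ hx
      have hTx : pvTimes x.2 (logs ++ [x]) = [x.1] := by
        rw [pvTimes_append, hT0, if_pos (by simp)]
        rfl
      have hpersons : pvPersons (logs ++ [x]) = pvPersons logs ++ [x.2] := by
        rw [pvPersons_append, PySem.Set.add, if_neg (by
          intro h
          exact hx ((PySem.Set.contains_iff _ _).mp h))]
      unfold pvBStep
      simp only [hc1, Bool.false_eq_true, if_false]
      have hgd : ((S.2.insert x.2 0).getD x.2 0) = 0 := PySem.Dict.getD_insert_self _ _ _ _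
      simp only [hgd]
      have hb : (PySem.Int.mod 0 2 == 0) = true := rfl
      rw [hb]
      constructor
      · rw [if_pos rfl,
          show (S.1.insert x.2 0).modify x.2 0 (fun v => v - x.1) = (S.1.insert x.2 0).insert x.2 ((S.1.insert x.2 0).getD x.2 0 - x.1) from rfl,
          PySem.Dict.getD_insert_self, PySem.Dict.insert_insert_self,
          PySem.Dict.items_insert_of_not_contains _ _ hc1, ih1, hpersons, List.map_append]
        congr 1
        · apply List.map_congr_left
          intro p hp'
          rw [hother p (fun h => hx (h ▸ hp'))]
        · simp [hTx, pvSgnSum]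
      · rw [show (S.2.insert x.2 0).modify x.2 0 (fun v => v + 1) = (S.2.insert x.2 0).insert x.2 ((S.2.insert x.2 0).getD x.2 0 + 1) from rfl,
          hgd, PySem.Dict.insert_insert_self,
          PySem.Dict.items_insert_of_not_contains _ _ hc2, ih2, hpersons, List.map_append]
        congr 1
        · apply List.map_congr_left
          intro p hp'
          rw [hother p (fun h => hx (h ▸ hp'))]
        · simp [hTx]

theorem getTimeSpent_alt_eq_spec (logs : List (Int × String)) : getTimeSpent_alt logs = pvSpec logs := by
  unfold getTimeSpent_alt pvSpec
  exact (pvB_inv logs).1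

-- ===== VERDICT (by name: the statement is the Claim_ definition above) =====
theorem getTimeSpent_spec : Claim_equal_getTimeSpent := by
  intro logs _
  unfold Spec_getTimeSpent
  rw [getTimeSpent_eq_spec, getTimeSpent_alt_eq_spec]
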